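-- pv_equiv track=rewrite | github.com/jairamd22/thirukanitham | thirumagal_v2_1/horoscope.py | p_format
-- ===== SOURCE A (Python) =====
-- def p_format(s):
--     cnt=0
--     str1 = ""
--     for ele in s:
--         str1 += ele
--         cnt=cnt+1
--         if cnt==2:
--             cnt=0
--             str1 += "<br>"
--         else:
--             str1 += " "
--
--     return str1
-- ===== SOURCE B (Python) =====
-- def p_format(s):
--     s = list(s)
--     chunks = []
--     for i in range(0, len(s), 2):
--         c = s[i:i+2]
--         if len(c) == 2:
--             chunks.append(c[0] + ' ' + c[1] + '<br>')
--         else: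
--             chunks.append(c[0] + ' ')
--     return ''.join(chunks)
-- ===== Notes on version B (the rewrite author's own statement) =====
-- stated objective: alternative
-- what changed: Replaces the per-element running counter and single growing string with a pair-wise pass: step-2 slicing builds one chunk string per pair (or odd tail) and the result is a single join of the chunks.
import Mathlib
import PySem

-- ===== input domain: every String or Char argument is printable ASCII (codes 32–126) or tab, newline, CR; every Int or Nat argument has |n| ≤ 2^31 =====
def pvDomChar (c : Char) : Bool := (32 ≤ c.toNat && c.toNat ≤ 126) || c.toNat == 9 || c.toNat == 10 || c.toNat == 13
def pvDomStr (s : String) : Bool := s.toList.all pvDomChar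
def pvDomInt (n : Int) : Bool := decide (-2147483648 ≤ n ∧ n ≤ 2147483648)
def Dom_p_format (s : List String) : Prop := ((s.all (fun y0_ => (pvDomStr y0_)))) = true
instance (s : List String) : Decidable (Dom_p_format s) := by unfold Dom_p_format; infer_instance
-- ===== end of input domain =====

-- B replaces A's per-element counter loop with a pair-wise chunking pass joined at the end (alternative decomposition, same cost).


-- ===== PORT A =====
-- literal transliteration: fold over the elements carrying (cnt, str1)
def p_format (s : List String) : String :=
  (s.foldl (fun (st : Int × String) ele =>
      let str1 := st.2 ++ ele
      let cnt := st.1 + 1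
      if cnt = 2 then (0, str1 ++ "<br>") else (cnt, str1 ++ " "))
    (0, "")).2

-- ===== PORT B =====
-- B builds one chunk per pair (step-2 pass) and joins the chunks; ported as
-- the structurally identical two-at-a-time recursion producing the chunk list.
def p_format_chunks : List String → List String
  | [] => []
  | [a] => [a ++ " "]
  | a :: b :: rest => (a ++ " " ++ b ++ "<br>") :: p_format_chunks rest

def p_format_alt (s : List String) : String :=
  String.join (p_format_chunks s)

-- ===== PRECONDITION & SPEC =====
def Spec_p_format (s : List String) (out : String) : Prop := out = p_format_alt s
instance (s : List String) (out : String) : Decidable (Spec_p_format s out) := by unfold Spec_p_format; infer_instance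

-- ===== CLAIM (what is proved, stated in full; the proofs are below) =====
def Claim_equal_p_format : Prop := ∀ (s : List String), Dom_p_format s → Spec_p_format s (p_format s)

-- ===== LEMMAS AND PROOFS =====

-- String.join distributes over cons
theorem join_foldl_shift (l : List String) : ∀ (x : String),
    List.foldl (fun r s => r ++ s) x l = x ++ List.foldl (fun r s => r ++ s) "" l := by
  induction l with
  | nil => intro x; simp
  | cons c l ih => intro x; simp only [List.foldl_cons]; rw [ih (x ++ c), ih ("" ++ c)]; simp [String.append_assoc]

theorem join_cons (c : String) (l : List String) : String.join (c :: l) = c ++ String.join l := by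
  simp only [String.join, List.foldl_cons]; rw [join_foldl_shift]; simp

-- the fold started at count 0 with accumulator `acc` appends exactly the joined chunks
theorem p_format_fold_eq (s : List String) : ∀ (acc : String),
    (s.foldl (fun (st : Int × String) ele =>
        let str1 := st.2 ++ ele
        let cnt := st.1 + 1
        if cnt = 2 then (0, str1 ++ "<br>") else (cnt, str1 ++ " "))
      (0, acc)).2 = acc ++ String.join (p_format_chunks s) := by
  induction s using p_format_chunks.induct with
  | case1 => intro acc; simp [p_format_chunks, String.join]
  | case2 a => intro acc; simp [p_format_chunks, String.join, String.append_assoc]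
  | case3 a b rest ih =>
      intro acc
      simp only [List.foldl_cons]
      norm_num
      rw [ih (acc ++ a ++ " " ++ b ++ "<br>"), p_format_chunks, join_cons]
      simp [String.append_assoc]

-- ===== VERDICT (by name: the statement is the Claim_ definition above) =====
theorem p_format_spec : Claim_equal_p_format := by
  intro s _
  unfold Spec_p_format p_format p_format_alt
  rw [p_format_fold_eq]
  simp
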